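-- pv_equiv track=rewrite | github.com/hyeong8465/coding_test | Python/백준/Gold/1030. 프렉탈 평면/프렉탈 평면.py | is_black
-- ===== SOURCE A (Python) =====
-- def is_black(s, n, k, r, c):
--     if s == 0:
--         return 0  # 기본적으로 0으로 시작
--
--     block_size = n ** (s - 1)  # 현재 단계에서 한 블록의 크기
--     center_start = (n - k) // 2 * block_size  # 중앙 영역 시작
--     center_end = center_start + k * block_size - 1  # 중앙 영역 끝
--
--     # 현재 위치가 중앙 검은색 영역에 속하면 1
--     if center_start <= r <= center_end and center_start <= c <= center_end:
--         return 1
--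
--     # 아니라면 더 작은 블록에서 확인
--     return is_black(s - 1, n, k, r % block_size, c % block_size)
-- ===== SOURCE B (Python) =====
-- def is_black(s, n, k, r, c):
--     # Loop over levels with the block size maintained by one division per level
--     # instead of recursion with a fresh n**(s-1) power at every level.
--     m = (n - k) // 2
--     bs = n ** (s - 1) if s > 0 else 0
--     while s > 0:
--         cs = m * bs
--         ce = cs + k * bs - 1
--         if cs <= r <= ce and cs <= c <= ce:
--             return 1
--         r %= bs
--         c %= bs
--         s -= 1
--         if s:
--             bs //= n
--     return 0
-- ===== Notes on version B (the rewrite author's own statement) =====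
-- stated objective: alternative
-- what changed: Recursion is replaced by a while loop that computes n**(s-1) once and maintains the block size with a single floor division per level, instead of recomputing a fresh power at every recursive call.
-- outside the precondition, e.g. on is_black(-1, -1, -1, -1, -1): A returns 1, B returns 0
import Mathlib
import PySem

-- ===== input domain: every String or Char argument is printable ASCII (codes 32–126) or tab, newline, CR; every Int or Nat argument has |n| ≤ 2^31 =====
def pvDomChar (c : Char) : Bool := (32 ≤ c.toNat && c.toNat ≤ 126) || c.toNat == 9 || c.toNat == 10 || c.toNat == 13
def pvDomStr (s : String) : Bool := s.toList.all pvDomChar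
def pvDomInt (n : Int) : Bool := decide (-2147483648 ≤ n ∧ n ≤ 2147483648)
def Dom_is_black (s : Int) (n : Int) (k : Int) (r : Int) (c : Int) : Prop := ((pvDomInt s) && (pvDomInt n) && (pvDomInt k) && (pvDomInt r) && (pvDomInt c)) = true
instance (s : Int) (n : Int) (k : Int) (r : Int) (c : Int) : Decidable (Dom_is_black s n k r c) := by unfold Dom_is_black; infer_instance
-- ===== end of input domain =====

-- B replaces A's recursion (a fresh n**(s-1) power at every level) by a single loop that
-- maintains the block size with one division per level; objective: alternative decomposition.

-- ===== PORT A =====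
-- fuel = s.toNat: inside Pre_ (0 ≤ s) it exactly covers the recursion depth of A.
def isBlackA : Nat → Int → Int → Int → Int → Int → Int
  | 0, _, _, _, _, _ => 0
  | f + 1, s, n, k, r, c =>
    if s = 0 then 0
    else
      let bs := n ^ (s - 1).toNat   -- n ** (s-1); exponent ≥ 0 inside Pre_
      let cs := PySem.Int.floordiv (n - k) 2 * bs
      let ce := cs + k * bs - 1
      if cs ≤ r ∧ r ≤ ce ∧ cs ≤ c ∧ c ≤ ce then 1
      else isBlackA f (s - 1) n k (PySem.Int.mod r bs) (PySem.Int.mod c bs)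

def is_black (s : Int) (n : Int) (k : Int) (r : Int) (c : Int) : Int :=
  isBlackA s.toNat s n k r c

-- ===== PORT B =====
-- the while-loop of Source B, fuel = s.toNat (one loop iteration per unit of s)
def isBlackBLoop : Nat → Int → Int → Int → Int → Int → Int → Int → Int
  | 0, _, _, _, _, _, _, _ => 0
  | f + 1, s, n, k, m, r, c, bs =>
    if 0 < s then
      let cs := m * bs
      let ce := cs + k * bs - 1
      if cs ≤ r ∧ r ≤ ce ∧ cs ≤ c ∧ c ≤ ce then 1
      else
        let r' := PySem.Int.mod r bs
        let c' := PySem.Int.mod c bs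
        let s' := s - 1
        let bs' := if s' ≠ 0 then PySem.Int.floordiv bs n else bs
        isBlackBLoop f s' n k m r' c' bs'
    else 0

def is_black_alt (s : Int) (n : Int) (k : Int) (r : Int) (c : Int) : Int :=
  let m := PySem.Int.floordiv (n - k) 2
  let bs := if 0 < s then n ^ (s - 1).toNat else 0
  isBlackBLoop s.toNat s n k m r c bs

-- ===== PRECONDITION & SPEC =====
-- Pre_ excludes exactly the inputs where the Python A raises or leaves the int type:
-- s < 0 (n ** (s-1) is a float, so A either raises RecursionError or returns a value
-- produced by float arithmetic that no int specification would fix — see the cite), and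
-- n = 0 with s ≥ 2 (block_size is 0 and r % 0 raises ZeroDivisionError; B raises there too).
def Pre_is_black (s : Int) (n : Int) (k : Int) (r : Int) (c : Int) : Prop :=
  0 ≤ s ∧ (n ≠ 0 ∨ s ≤ 1)
instance (s : Int) (n : Int) (k : Int) (r : Int) (c : Int) : Decidable (Pre_is_black s n k r c) := by unfold Pre_is_black; infer_instance
def pvWitness_is_black : Int × Int × Int × Int × Int := (2, 3, 1, 4, 4)

def Spec_is_black (s : Int) (n : Int) (k : Int) (r : Int) (c : Int) (out : Int) : Prop := out = is_black_alt s n k r c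
instance (s : Int) (n : Int) (k : Int) (r : Int) (c : Int) (out : Int) : Decidable (Spec_is_black s n k r c out) := by unfold Spec_is_black; infer_instance

-- ===== CLAIM (what is proved, stated in full; the proofs are below) =====
def Claim_equal_is_black : Prop := ∀ (s : Int) (n : Int) (k : Int) (r : Int) (c : Int), Dom_is_black s n k r c → Pre_is_black s n k r c → Spec_is_black s n k r c (is_black s n k r c)

-- ===== LEMMAS AND PROOFS =====

-- invariant: whenever 0 < s the maintained block size equals n^(s-1)
lemma key (f : Nat) : ∀ (s n k r c bs : Int), s.toNat = f → 0 ≤ s → (n ≠ 0 ∨ s ≤ 1) →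
    (0 < s → bs = n ^ (s - 1).toNat) →
    isBlackBLoop f s n k (PySem.Int.floordiv (n - k) 2) r c bs = isBlackA f s n k r c := by
  induction f with
  | zero => intro s n k r c bs _ _ _ _; rfl
  | succ f ih =>
    intro s n k r c bs hf hs hn hbs
    have hspos : 0 < s := by omega
    have hbs' := hbs hspos
    simp only [isBlackBLoop, isBlackA, if_pos hspos, if_neg (by omega : ¬ s = 0), hbs']
    split
    · rfl
    · have hf' : (s - 1).toNat = f := by omega
      rw [ih (s - 1) n k _ _ _ hf' (by omega) (by omega)]
      intro hs1
      have hnz : n ≠ 0 := by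
        rcases hn with h | h
        · exact h
        · omega
      split
      · -- s - 1 ≠ 0: divide the power by n once
        have : (s - 1 - 1).toNat + 1 = (s - 1).toNat := by omega
        rw [show PySem.Int.floordiv (n ^ (s - 1).toNat) n = n ^ (s - 1 - 1).toNat from ?_]
        rw [← this, pow_succ, PySem.Int.floordiv]
        exact Int.mul_fdiv_cancel _ hnz
      · omega

theorem is_black_spec_aux (s n k r c : Int) (hs : 0 ≤ s) (hn : n ≠ 0 ∨ s ≤ 1) :
    is_black s n k r c = is_black_alt s n k r c := by
  unfold is_black is_black_alt
  by_cases hpos : 0 < s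
  · rw [key s.toNat s n k r c _ rfl hs hn (by intro _; simp [hpos])]
  · have h0 : s = 0 := by omega
    subst h0
    rfl

-- ===== VERDICT (by name: the statement is the Claim_ definition above) =====
theorem is_black_spec : Claim_equal_is_black := by
  intro s n k r c _ hpre
  unfold Spec_is_black
  exact is_black_spec_aux s n k r c hpre.1 hpre.2
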